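-- pv_equiv track=rewrite | github.com/Mahakumbh26/Report | project/services/report_service.py | _calc_global_status
-- ===== SOURCE A (Python) =====
-- def _calc_global_status(grouped_analysis: dict) -> str:
--     severities = []
--     for ana in grouped_analysis.values():
--         val = ana.get("overall_status", "HEALTHY")
--         severities.append(val)
--
--     if "CRITICAL" in severities: return "CRITICAL"
--     if "DEGRADED" in severities: return "DEGRADED"
--     if "WARNING" in severities: return "WARNING"
--     return "HEALTHY"
-- ===== SOURCE B (Python) =====
-- def _calc_global_status(grouped_analysis: dict) -> str:
--     worst = 0
--     for ana in grouped_analysis.values():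
--         s = ana.get("overall_status", "HEALTHY")
--         r = 3 if s == "CRITICAL" else 2 if s == "DEGRADED" else 1 if s == "WARNING" else 0
--         if r > worst:
--             worst = r
--     return "CRITICAL" if worst == 3 else "DEGRADED" if worst == 2 else "WARNING" if worst == 1 else "HEALTHY"
-- ===== Notes on version B (the rewrite author's own statement) =====
-- stated objective: idiomatic
-- what changed: Replaces the intermediate severities list plus three separate membership scans with a single pass that tracks the maximum severity rank and maps the winning rank back to its label.
import Mathlib
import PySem

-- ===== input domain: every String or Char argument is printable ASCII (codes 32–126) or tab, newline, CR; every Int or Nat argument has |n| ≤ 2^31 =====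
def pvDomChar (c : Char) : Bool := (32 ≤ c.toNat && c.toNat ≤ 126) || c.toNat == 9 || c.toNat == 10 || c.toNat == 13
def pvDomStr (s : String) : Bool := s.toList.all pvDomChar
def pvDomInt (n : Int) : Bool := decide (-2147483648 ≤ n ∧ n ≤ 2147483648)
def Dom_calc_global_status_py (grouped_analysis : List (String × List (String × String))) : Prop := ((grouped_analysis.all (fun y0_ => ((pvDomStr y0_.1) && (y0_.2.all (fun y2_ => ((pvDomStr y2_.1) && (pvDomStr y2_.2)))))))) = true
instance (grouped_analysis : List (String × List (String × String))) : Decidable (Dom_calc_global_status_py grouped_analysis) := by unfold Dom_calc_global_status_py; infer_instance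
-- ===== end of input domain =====

-- B replaces A's intermediate severities list and three membership scans with one pass
-- tracking the maximum severity rank (idiomatic single-pass max; same O(n) cost).

-- ===== PORT A =====
def calc_global_status_py (grouped_analysis : List (String × List (String × String))) : String :=
  let severities : List String :=
    grouped_analysis.foldl
      (fun acc kv => acc ++ [(PySem.Dict.mk kv.2).getD "overall_status" "HEALTHY"]) []
  if severities.contains "CRITICAL" then "CRITICAL"
  else if severities.contains "DEGRADED" then "DEGRADED"
  else if severities.contains "WARNING" then "WARNING"
  else "HEALTHY"

-- ===== PORT B =====
-- rank of a status string (Source B's conditional-expression chain, exact)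
def pvRank (s : String) : Nat :=
  if s = "CRITICAL" then 3 else if s = "DEGRADED" then 2 else if s = "WARNING" then 1 else 0

def calc_global_status_py_alt (grouped_analysis : List (String × List (String × String))) : String :=
  let worst : Nat :=
    grouped_analysis.foldl
      (fun w kv =>
        let r := pvRank ((PySem.Dict.mk kv.2).getD "overall_status" "HEALTHY")
        if r > w then r else w) 0
  if worst = 3 then "CRITICAL" else if worst = 2 then "DEGRADED"
  else if worst = 1 then "WARNING" else "HEALTHY"

-- ===== PRECONDITION & SPEC =====
def Spec_calc_global_status_py (grouped_analysis : List (String × List (String × String))) (out : String) : Prop := out = calc_global_status_py_alt grouped_analysis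
instance (grouped_analysis : List (String × List (String × String))) (out : String) : Decidable (Spec_calc_global_status_py grouped_analysis out) := by unfold Spec_calc_global_status_py; infer_instance

-- ===== CLAIM (what is proved, stated in full; the proofs are below) =====
def Claim_equal_calc_global_status_py : Prop := ∀ (grouped_analysis : List (String × List (String × String))), Dom_calc_global_status_py grouped_analysis → Spec_calc_global_status_py grouped_analysis (calc_global_status_py grouped_analysis)

-- ===== LEMMAS AND PROOFS =====

-- the status string extracted from one entry
def pvVal (kv : String × List (String × String)) : String :=
  (PySem.Dict.mk kv.2).getD "overall_status" "HEALTHY"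

-- maximum rank of a list of status strings
def pvM (xs : List String) : Nat := (xs.map pvRank).foldr max 0

theorem pvA_foldl (l : List (String × List (String × String))) (acc : List String) :
    l.foldl (fun acc kv => acc ++ [(PySem.Dict.mk kv.2).getD "overall_status" "HEALTHY"]) acc
      = acc ++ l.map pvVal := by
  induction l generalizing acc with
  | nil => simp
  | cons kv l ih => simp [List.foldl_cons, ih, pvVal]

theorem pvB_foldl (l : List (String × List (String × String))) (w : Nat) :
    l.foldl (fun w kv =>
        let r := pvRank ((PySem.Dict.mk kv.2).getD "overall_status" "HEALTHY")
        if r > w then r else w) w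
      = max w (pvM (l.map pvVal)) := by
  induction l generalizing w with
  | nil => simp [pvM]
  | cons kv l ih =>
    simp only [List.foldl_cons, List.map_cons, pvM, List.foldr_cons]
    rw [ih]
    have : (if pvRank (pvVal kv) > w then pvRank (pvVal kv) else w) = max w (pvRank (pvVal kv)) := by
      unfold pvVal; split <;> omega
    unfold pvVal at this ⊢
    rw [this]
    simp [pvM, Nat.max_assoc]

theorem pvM_char (xs : List String) :
    (pvM xs = 3 ↔ "CRITICAL" ∈ xs)
    ∧ (2 ≤ pvM xs ↔ ("CRITICAL" ∈ xs ∨ "DEGRADED" ∈ xs))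
    ∧ (1 ≤ pvM xs ↔ ("CRITICAL" ∈ xs ∨ "DEGRADED" ∈ xs ∨ "WARNING" ∈ xs))
    ∧ pvM xs ≤ 3 := by
  induction xs with
  | nil => simp [pvM]
  | cons s xs ih =>
    obtain ⟨h3, h2, h1, hle⟩ := ih
    have hM : pvM (s :: xs) = max (pvRank s) (pvM xs) := by simp [pvM]
    have hr : (pvRank s = 3 ↔ s = "CRITICAL") ∧ (pvRank s = 2 ↔ s = "DEGRADED")
        ∧ (pvRank s = 1 ↔ s = "WARNING") ∧ pvRank s ≤ 3 := by
      unfold pvRank; split_ifs <;> simp_all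
    obtain ⟨r3, r2, r1, rle⟩ := hr
    simp only [hM, List.mem_cons]
    refine ⟨⟨fun h => ?_, ?_⟩, ⟨fun h => ?_, ?_⟩, ⟨fun h => ?_, ?_⟩, by omega⟩
    · have : pvRank s = 3 ∨ pvM xs = 3 := by omega
      rcases this with h' | h'
      · exact Or.inl (r3.mp h').symm
      · exact Or.inr (h3.mp h')
    · rintro (h | h)
      · have := r3.mpr h.symm; omega
      · have := h3.mpr h; omega
    · have : 2 ≤ pvRank s ∨ 2 ≤ pvM xs := by omega
      rcases this with h' | h'
      · have : pvRank s = 2 ∨ pvRank s = 3 := by omega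
        rcases this with h'' | h''
        · exact Or.inr (Or.inl (r2.mp h'').symm)
        · exact Or.inl (Or.inl (r3.mp h'').symm)
      · rcases h2.mp h' with h'' | h''
        · exact Or.inl (Or.inr h'')
        · exact Or.inr (Or.inr h'')
    · rintro ((h | h) | (h | h))
      · have := r3.mpr h.symm; omega
      · have := h3.mpr h; omega
      · have := r2.mpr h.symm; omega
      · have := h2.mpr (Or.inr h); omega
    · have : 1 ≤ pvRank s ∨ 1 ≤ pvM xs := by omega
      rcases this with h' | h'
      · have : pvRank s = 1 ∨ pvRank s = 2 ∨ pvRank s = 3 := by omega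
        rcases this with h'' | h'' | h''
        · exact Or.inr (Or.inr (Or.inl (r1.mp h'').symm))
        · exact Or.inr (Or.inl (Or.inl (r2.mp h'').symm))
        · exact Or.inl (Or.inl (r3.mp h'').symm)
      · rcases h1.mp h' with h'' | h'' | h''
        · exact Or.inl (Or.inr h'')
        · exact Or.inr (Or.inl (Or.inr h''))
        · exact Or.inr (Or.inr (Or.inr h''))
    · rintro ((h | h) | ((h | h) | (h | h)))
      · have := r3.mpr h.symm; omega
      · have := h3.mpr h; omega
      · have := r2.mpr h.symm; omega
      · have := h2.mpr (Or.inr h); omega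
      · have := r1.mpr h.symm; omega
      · have := h1.mpr (Or.inr (Or.inr h)); omega

theorem calc_eq (g : List (String × List (String × String))) :
    calc_global_status_py g = calc_global_status_py_alt g := by
  unfold calc_global_status_py calc_global_status_py_alt
  rw [pvA_foldl, pvB_foldl]
  simp only [List.nil_append, Nat.zero_max]
  set xs := g.map pvVal with hxs
  obtain ⟨h3, h2, h1, hle⟩ := pvM_char xs
  by_cases c3 : "CRITICAL" ∈ xs
  · have hv : pvM xs = 3 := h3.mpr c3
    simp [c3, hv]
  · by_cases c2 : "DEGRADED" ∈ xs
    · have hge : 2 ≤ pvM xs := h2.mpr (Or.inr c2)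
      have hne : pvM xs ≠ 3 := fun h => c3 (h3.mp h)
      have hv : pvM xs = 2 := by omega
      simp [c3, c2, hv]
    · by_cases c1 : "WARNING" ∈ xs
      · have hge : 1 ≤ pvM xs := h1.mpr (Or.inr (Or.inr c1))
        have hlt : ¬ 2 ≤ pvM xs := fun h => by rcases h2.mp h with h | h <;> [exact c3 h; exact c2 h]
        have hv : pvM xs = 1 := by omega
        simp [c3, c2, c1, hv]
      · have hno : ¬ 1 ≤ pvM xs := fun h => by
          rcases h1.mp h with h | h | h
          · exact c3 h
          · exact c2 h
          · exact c1 h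
        have h0 : pvM xs = 0 := by omega
        simp [c3, c2, c1, h0]

-- ===== VERDICT (by name: the statement is the Claim_ definition above) =====
theorem calc_global_status_py_spec : Claim_equal_calc_global_status_py := by
  intro g _
  unfold Spec_calc_global_status_py
  exact calc_eq g
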